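-- pv_equiv track=rewrite | github.com/YichenGao/mlsp-project | tkr/hashing.py | make_triplets
-- ===== SOURCE A (Python) =====
-- def make_triplets(coordinates, dt=10, df=10):
--     '''Convert a set of coordinates into a set of triplets.
--     The coordinates are assumed to be in (time, frequency) order.
--
--     Args:
--         coordinates (array): Array of size (num_points, 2) with coordinates.
--         dt (int): Consider times within dt samples of t.
--         df (int): Consider frequencies within df samples of f.
--
--     Returns:
--         items (list): List of triplets.
--     '''
--
--     items = []
--     for anchor in coordinates:
--         t0, f0 = anchor
--         for coordinate in coordinates:
--             t1, f1 = coordinate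
--             if (t0 - dt < t1 < t0 + dt) and (f0 - df < f1 < f0 + df):
--                 items.append((t1, (f0, f1, t1 - t0)))
--     return items
-- ===== SOURCE B (Python) =====
-- def _bisect_left(a, x):
--     lo, hi = 0, len(a)
--     while lo < hi:
--         mid = (lo + hi) // 2
--         if a[mid] < x:
--             lo = mid + 1
--         else:
--             hi = mid
--     return lo
--
--
-- def make_triplets(coordinates, dt=10, df=10):
--     # Sort the points by time once; per anchor, binary-search the open time
--     # window (t0-dt, t0+dt), filter by frequency, and restore original order
--     # by sorting the few candidates on their original index.
--     pts = sorted(enumerate(coordinates), key=lambda p: p[1][0])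
--     times = [p[1][0] for p in pts]
--     items = []
--     for t0, f0 in coordinates:
--         lo = _bisect_left(times, t0 - dt + 1)
--         hi = _bisect_left(times, t0 + dt)
--         cand = sorted((p for p in pts[lo:hi] if f0 - df < p[1][1] < f0 + df),
--                       key=lambda p: p[0])
--         for _, (t1, f1) in cand:
--             items.append((t1, (f0, f1, t1 - t0)))
--     return items
-- ===== Notes on version B (the rewrite author's own statement) =====
-- stated objective: alternative
-- what changed: Replaces the all-pairs scan per anchor by a one-time sort by time plus a binary-searched time window per anchor (frequency filter on the window, candidates restored to original order via their indices); on dense windows the cost matches A's, on sparse windows it avoids the full inner scan.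
import Mathlib
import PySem

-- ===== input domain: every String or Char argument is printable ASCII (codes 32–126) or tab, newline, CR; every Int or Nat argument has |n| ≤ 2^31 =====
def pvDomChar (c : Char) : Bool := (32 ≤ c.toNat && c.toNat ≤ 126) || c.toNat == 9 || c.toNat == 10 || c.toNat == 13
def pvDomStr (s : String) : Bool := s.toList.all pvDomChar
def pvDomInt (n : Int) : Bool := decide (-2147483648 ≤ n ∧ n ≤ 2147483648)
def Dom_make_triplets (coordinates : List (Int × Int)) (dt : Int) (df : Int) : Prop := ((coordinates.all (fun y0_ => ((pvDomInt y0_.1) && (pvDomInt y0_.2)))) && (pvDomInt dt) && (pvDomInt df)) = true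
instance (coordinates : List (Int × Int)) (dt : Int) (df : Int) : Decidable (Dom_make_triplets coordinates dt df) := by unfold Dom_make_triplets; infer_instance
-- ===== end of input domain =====

-- B replaces A's all-pairs scan by one sort by time plus a binary-searched time
-- window per anchor (objective: alternative algorithm; equal output, including order).

-- ===== PORT A =====
-- A: for each anchor, scan ALL coordinates and append the ones inside the time/freq window.
def make_triplets (coordinates : List (Int × Int)) (dt : Int) (df : Int) :
    List (Int × (Int × Int × Int)) :=
  coordinates.foldl (fun items anchor =>
    coordinates.foldl (fun items coordinate =>
      if ((decide (anchor.1 - dt < coordinate.1) && decide (coordinate.1 < anchor.1 + dt)) &&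
          (decide (anchor.2 - df < coordinate.2) && decide (coordinate.2 < anchor.2 + df))) = true
      then items ++ [(coordinate.1, (anchor.2, coordinate.2, coordinate.1 - anchor.1))]
      else items) items) []

-- ===== PORT B =====
-- B (Source B): pts = sorted(enumerate(coordinates), key=time); times = their time keys;
-- per anchor, bisect the open time window, filter on frequency, re-sort the few
-- candidates by original index, emit.  Source B's hand-written `_bisect_left` is exactly
-- Python's bisect.bisect_left, ported as PySem.List.bisectLeft (exact).
def make_triplets_alt (coordinates : List (Int × Int)) (dt : Int) (df : Int) :
    List (Int × (Int × Int × Int)) :=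
  let pts := PySem.List.sorted (PySem.List.enumerate coordinates 0) (fun p => p.2.1)
  let times := pts.map (fun p => p.2.1)
  coordinates.foldl (fun items a =>
    items ++
      (PySem.List.sorted
        ((PySem.List.slice pts (some ((PySem.List.bisectLeft times (a.1 - dt + 1) : Nat) : Int))
            (some ((PySem.List.bisectLeft times (a.1 + dt) : Nat) : Int))).filter
          (fun p => decide (a.2 - df < p.2.2) && decide (p.2.2 < a.2 + df)))
        (fun p => p.1)).map (fun p => (p.2.1, (a.2, p.2.2, p.2.1 - a.1)))) []

-- ===== PRECONDITION & SPEC =====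
def Spec_make_triplets (coordinates : List (Int × Int)) (dt : Int) (df : Int) (out : List (Int × (Int × Int × Int))) : Prop := out = make_triplets_alt coordinates dt df
instance (coordinates : List (Int × Int)) (dt : Int) (df : Int) (out : List (Int × (Int × Int × Int))) : Decidable (Spec_make_triplets coordinates dt df out) := by unfold Spec_make_triplets; infer_instance

-- ===== CLAIM (what is proved, stated in full; the proofs are below) =====
def Claim_equal_make_triplets : Prop := ∀ (coordinates : List (Int × Int)) (dt : Int) (df : Int), Dom_make_triplets coordinates dt df → Spec_make_triplets coordinates dt df (make_triplets coordinates dt df)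

-- ===== LEMMAS AND PROOFS =====

-- A filter whose predicate holds exactly on the index interval [lo, hi) is the
-- drop/take slice of that interval.
theorem pv_filter_eq_drop_take {α : Type} (xs : List α) (q : α → Bool) (lo hi : Nat)
    (hchar : ∀ (j : Nat) (h : j < xs.length), q xs[j] = true ↔ (lo ≤ j ∧ j < hi)) :
    xs.filter q = (xs.drop lo).take (hi - lo) := by
  induction xs generalizing lo hi with
  | nil => simp
  | cons x xs ih =>
    have h0 := hchar 0 (by simp)
    simp only [List.getElem_cons_zero] at h0
    rcases Nat.eq_zero_or_pos lo with hlo | hlo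
    · subst hlo
      rcases Nat.eq_zero_or_pos hi with hhi | hhi
      · subst hhi
        have hx : q x = false := by
          rcases hq : q x with _ | _
          · rfl
          · exact absurd (h0.mp hq).2 (by omega)
        have hrest : xs.filter q = [] := by
          have := ih 0 0 (fun j hj => by
            have := hchar (j + 1) (by simpa using Nat.succ_lt_succ hj)
            simp only [List.getElem_cons_succ] at this
            constructor
            · intro hq; exact absurd (this.mp hq).2 (by omega)
            · intro h; omega)
          simpa using this
        simp [hx, hrest]
      · have hx : q x = true := h0.mpr ⟨Nat.le_refl 0, hhi⟩
        have hrest := ih 0 (hi - 1) (fun j hj => by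
          have := hchar (j + 1) (by simpa using Nat.succ_lt_succ hj)
          simp only [List.getElem_cons_succ] at this
          rw [this]; omega)
        obtain ⟨k, rfl⟩ : ∃ k, hi = k + 1 := ⟨hi - 1, by omega⟩
        simp only [List.filter_cons, hx, if_true, List.drop_zero, Nat.sub_zero,
          List.take_succ_cons, List.cons.injEq, true_and]
        simpa using hrest
    · obtain ⟨l, rfl⟩ : ∃ l, lo = l + 1 := ⟨lo - 1, by omega⟩
      have hx : q x = false := by
        rcases hq : q x with _ | _
        · rfl
        · exact absurd (h0.mp hq).1 (by omega)
      have hrest := ih l (hi - 1) (fun j hj => by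
        have := hchar (j + 1) (by simpa using Nat.succ_lt_succ hj)
        simp only [List.getElem_cons_succ] at this
        rw [this]; omega)
      simp only [List.filter_cons, hx, Bool.false_eq_true, if_false, List.drop_succ_cons]
      rw [hrest]
      congr 1
      omega

-- Filtering enumerate on a predicate of the element and projecting the element back
-- is filtering the underlying list.
theorem pv_enumerate_filter_map {α β : Type} (xs : List α) (s : Int)
    (r : α → Bool) (g : α → β) :
    ((PySem.List.enumerate xs s).filter (fun p => r p.2)).map (fun p => g p.2)
      = (xs.filter r).map g := by
  induction xs generalizing s with
  | nil => simp [PySem.List.enumerate_nil]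
  | cons x xs ih =>
    rw [PySem.List.enumerate_cons]
    rcases hx : r x with _ | _
    · simp only [List.filter_cons, hx, Bool.false_eq_true, if_false]
      exact ih (s + 1)
    · simp only [List.filter_cons, hx, if_true, List.map_cons]
      rw [ih (s + 1)]

-- Per-anchor agreement: the binary-searched window, frequency-filtered and re-sorted
-- by original index, emits exactly what A's full scan emits for that anchor.
theorem pv_anchor_eq (coordinates : List (Int × Int)) (dt df : Int) (a : Int × Int) :
    (PySem.List.sorted
        ((PySem.List.slice (PySem.List.sorted (PySem.List.enumerate coordinates 0) (fun p => p.2.1))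
            (some ((PySem.List.bisectLeft ((PySem.List.sorted (PySem.List.enumerate coordinates 0) (fun p => p.2.1)).map (fun p => p.2.1)) (a.1 - dt + 1) : Nat) : Int))
            (some ((PySem.List.bisectLeft ((PySem.List.sorted (PySem.List.enumerate coordinates 0) (fun p => p.2.1)).map (fun p => p.2.1)) (a.1 + dt) : Nat) : Int))).filter
          (fun p => decide (a.2 - df < p.2.2) && decide (p.2.2 < a.2 + df)))
        (fun p => p.1)).map (fun p => (p.2.1, (a.2, p.2.2, p.2.1 - a.1)))
    = (coordinates.filter (fun c =>
        (decide (a.1 - dt < c.1) && decide (c.1 < a.1 + dt)) &&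
        (decide (a.2 - df < c.2) && decide (c.2 < a.2 + df)))).map
        (fun c => (c.1, (a.2, c.2, c.1 - a.1))) := by
  set pts := PySem.List.sorted (PySem.List.enumerate coordinates 0) (fun p => p.2.1) with hpts
  set times := pts.map (fun p => p.2.1) with htimesdef
  set lo := PySem.List.bisectLeft times (a.1 - dt + 1) with hlodef
  set hi := PySem.List.bisectLeft times (a.1 + dt) with hhidef
  have hpair : List.Pairwise (fun x y => x ≤ y) times := by
    rw [htimesdef]
    exact (List.pairwise_map).mpr (PySem.List.sorted_pairwise _ _)
  obtain ⟨hloLe, hlo1, hlo2⟩ := PySem.List.bisectLeft_spec times (a.1 - dt + 1) hpair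
  obtain ⟨hhiLe, hhi1, hhi2⟩ := PySem.List.bisectLeft_spec times (a.1 + dt) hpair
  have hlen : times.length = pts.length := by rw [htimesdef]; simp
  have hchar : ∀ (j : Nat) (h : j < pts.length),
      (fun p => decide (a.1 - dt < p.2.1) && decide (p.2.1 < a.1 + dt)) pts[j] = true
        ↔ (lo ≤ j ∧ j < hi) := by
    intro j h
    have hjt : j < times.length := by omega
    have ht : times[j]'hjt = pts[j].2.1 := by
      simp [htimesdef]
    simp only [Bool.and_eq_true, decide_eq_true_eq]
    constructor
    · rintro ⟨h1, h2⟩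
      constructor
      · by_contra hc
        have := hlo1 j hjt (by omega)
        rw [ht] at this
        omega
      · by_contra hc
        have := hhi2 j hjt (by omega)
        rw [ht] at this
        omega
    · rintro ⟨h1, h2⟩
      have ha := hlo2 j hjt h1
      have hb := hhi1 j hjt h2
      rw [ht] at ha hb
      omega
  have hslice : PySem.List.slice pts (some (lo : Int)) (some (hi : Int))
      = pts.filter (fun p => decide (a.1 - dt < p.2.1) && decide (p.2.1 < a.1 + dt)) := by
    rw [PySem.List.slice_natCast,
        ← pv_filter_eq_drop_take pts (fun p => decide (a.1 - dt < p.2.1) && decide (p.2.1 < a.1 + dt)) lo hi hchar]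
  rw [hslice, List.filter_filter,
      List.filter_congr (fun x _ => Bool.and_comm
        (decide (a.2 - df < x.2.2) && decide (x.2.2 < a.2 + df))
        (decide (a.1 - dt < x.2.1) && decide (x.2.1 < a.1 + dt)))]
  have hperm : (PySem.List.enumerate coordinates 0).Perm pts := (PySem.List.sorted_perm _ _ _).symm
  rw [PySem.List.sorted_eq_of_perm_of_pairwise_lt _
        ((PySem.List.enumerate coordinates 0).filter (fun p =>
          (decide (a.1 - dt < p.2.1) && decide (p.2.1 < a.1 + dt)) &&
          (decide (a.2 - df < p.2.2) && decide (p.2.2 < a.2 + df)))) _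
        (hperm.filter _)
        ((PySem.List.pairwise_lt_enumerate coordinates 0).filter _)]
  exact pv_enumerate_filter_map coordinates 0
    (fun c => (decide (a.1 - dt < c.1) && decide (c.1 < a.1 + dt)) &&
              (decide (a.2 - df < c.2) && decide (c.2 < a.2 + df)))
    (fun c => (c.1, (a.2, c.2, c.1 - a.1)))

theorem pv_make_triplets_flatMap (coordinates : List (Int × Int)) (dt df : Int) :
    make_triplets coordinates dt df
      = coordinates.flatMap (fun a =>
          (coordinates.filter (fun c =>
            (decide (a.1 - dt < c.1) && decide (c.1 < a.1 + dt)) &&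
            (decide (a.2 - df < c.2) && decide (c.2 < a.2 + df)))).map
            (fun c => (c.1, (a.2, c.2, c.1 - a.1)))) := by
  unfold make_triplets
  simp only [PySem.List.foldl_append_if, PySem.List.foldl_append_eq_flatMap, List.nil_append]

theorem pv_make_triplets_alt_flatMap (coordinates : List (Int × Int)) (dt df : Int) :
    make_triplets_alt coordinates dt df
      = coordinates.flatMap (fun a =>
          (PySem.List.sorted
            ((PySem.List.slice (PySem.List.sorted (PySem.List.enumerate coordinates 0) (fun p => p.2.1))
                (some ((PySem.List.bisectLeft ((PySem.List.sorted (PySem.List.enumerate coordinates 0) (fun p => p.2.1)).map (fun p => p.2.1)) (a.1 - dt + 1) : Nat) : Int))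
                (some ((PySem.List.bisectLeft ((PySem.List.sorted (PySem.List.enumerate coordinates 0) (fun p => p.2.1)).map (fun p => p.2.1)) (a.1 + dt) : Nat) : Int))).filter
              (fun p => decide (a.2 - df < p.2.2) && decide (p.2.2 < a.2 + df)))
            (fun p => p.1)).map (fun p => (p.2.1, (a.2, p.2.2, p.2.1 - a.1)))) := by
  unfold make_triplets_alt
  simp only [PySem.List.foldl_append_eq_flatMap, List.nil_append]

-- ===== VERDICT (by name: the statement is the Claim_ definition above) =====
theorem make_triplets_spec : Claim_equal_make_triplets := by
  intro coordinates dt df _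
  unfold Spec_make_triplets
  rw [pv_make_triplets_flatMap, pv_make_triplets_alt_flatMap]
  exact congrArg (fun g => List.flatMap g coordinates)
    (funext fun a => (pv_anchor_eq coordinates dt df a).symm)
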